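-- pv_equiv track=rewrite | github.com/RohanSai22/own-sif | .history/framework/mutator_20250625233341.py | _insert_code_before
-- ===== SOURCE A (Python) =====
-- def _insert_code_before(content: str, identifier: str, new_code: str) -> str:
--     """Insert code before a specific identifier."""
--     lines = content.split('\n')
--
--     # Find the identifier
--     insert_line = None
--     for i, line in enumerate(lines):
--         if identifier in line:
--             insert_line = i
--             break
--
--     if insert_line is None:
--         raise ValueError(f"Could not find identifier: {identifier}")
--
--     # Insert the new code
--     new_lines = lines[:insert_line] + [new_code] + lines[insert_line:]
--     return '\n'.join(new_lines)
-- ===== SOURCE B (Python) =====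
-- def _insert_code_before(content: str, identifier: str, new_code: str) -> str:
--     """Insert code before a specific identifier."""
--     pos = content.find(identifier)
--     if pos == -1 or '\n' in identifier:
--         raise ValueError(f"Could not find identifier: {identifier}")
--     head, nl, _tail = content[:pos].rpartition('\n')
--     line_start = len(head) + len(nl)
--     return content[:line_start] + new_code + '\n' + content[line_start:]
-- ===== Notes on version B (the rewrite author's own statement) =====
-- stated objective: idiomatic
-- what changed: A splits content into a line list, scans it for the first line containing the identifier, and rebuilds the string with join; B works on the raw string directly: str.find locates the first occurrence, rpartition of the prefix locates the start of that line, and the insertion is plain slicing, with the same ValueError when the identifier contains a newline or does not occur.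
import Mathlib
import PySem

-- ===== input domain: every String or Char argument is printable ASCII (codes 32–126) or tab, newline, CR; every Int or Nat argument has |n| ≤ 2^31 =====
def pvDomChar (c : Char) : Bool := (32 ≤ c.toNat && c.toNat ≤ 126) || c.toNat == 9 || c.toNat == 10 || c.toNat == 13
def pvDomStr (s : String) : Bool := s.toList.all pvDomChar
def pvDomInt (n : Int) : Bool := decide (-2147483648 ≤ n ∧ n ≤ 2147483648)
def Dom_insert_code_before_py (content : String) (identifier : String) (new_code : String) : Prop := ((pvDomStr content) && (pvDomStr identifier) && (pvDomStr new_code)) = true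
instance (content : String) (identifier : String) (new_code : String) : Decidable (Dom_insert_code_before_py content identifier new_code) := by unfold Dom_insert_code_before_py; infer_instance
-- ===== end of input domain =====

-- B replaces A's split/scan/join line pipeline by direct index arithmetic on the raw string
-- (find the first occurrence, rpartition its prefix at the last newline); return-value equivalence on Pre_.

-- ===== PORT A =====
-- A's scan 'for i, line in enumerate(lines): if identifier in line: insert_line = i; break'
def pvFindLine (lines : List (List Char)) (identifier : List Char) (i : Nat) : Option Nat :=
  match lines with
  | [] => none
  | l :: ls => if PySem.Chars.isIn identifier l = true then some i else pvFindLine ls identifier (i + 1)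

def pvACore (cs identifier nc : List Char) : List Char :=
  let lines := PySem.Chars.splitOn cs ['\n']
  match pvFindLine lines identifier 0 with
  | none => cs   -- Python: raise ValueError (excluded by Pre_)
  | some i =>
      PySem.Chars.join ['\n']
        (PySem.List.slice lines none (some (i : Int)) ++ [nc] ++ PySem.List.slice lines (some (i : Int)) none)

def insert_code_before_py (content : String) (identifier : String) (new_code : String) : String :=
  String.ofList (pvACore content.toList identifier.toList new_code.toList)

-- ===== PORT B =====
-- hand port of str.rpartition('\n') (PySem has no rpartition): exact for this fixed nonempty
-- separator — (head, tail) split at the LAST newline, none ↔ the string has no newline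
def pvRPartNl (s : List Char) : Option (List Char × List Char) :=
  match s with
  | [] => none
  | c :: cs =>
    match pvRPartNl cs with
    | some (h, t) => some (c :: h, t)
    | none => if c = '\n' then some ([], cs) else none

def pvBCore (cs identifier nc : List Char) : List Char :=
  let pos := PySem.Chars.find cs identifier
  if pos = -1 ∨ PySem.Chars.isIn ['\n'] identifier = true then cs   -- Python: raise ValueError (excluded by Pre_)
  else
    -- line_start = len(head) + len(nl) of content[:pos].rpartition('\n')
    let lineStart : Int :=
      match pvRPartNl (PySem.List.slice cs none (some pos)) with
      | none => 0
      | some (h, _) => h.length + 1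
    PySem.List.slice cs none (some lineStart) ++ nc ++ '\n' :: PySem.List.slice cs (some lineStart) none

def insert_code_before_py_alt (content : String) (identifier : String) (new_code : String) : String :=
  String.ofList (pvBCore content.toList identifier.toList new_code.toList)

-- ===== PRECONDITION & SPEC =====
-- Pre_ excludes exactly the inputs where A raises ValueError: the identifier must occur inside
-- one line of content, i.e. occur in content and contain no newline.
def Pre_insert_code_before_py (content : String) (identifier : String) (new_code : String) : Prop :=
  PySem.Str.isIn identifier content = true ∧ PySem.Str.isIn "\n" identifier = false
instance (content : String) (identifier : String) (new_code : String) : Decidable (Pre_insert_code_before_py content identifier new_code) := by unfold Pre_insert_code_before_py; infer_instance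

def pvWitness_insert_code_before_py : String × String × String :=
  ("x = 1\ny = 2\nz = 3", "y =", "# inserted")

def Spec_insert_code_before_py (content : String) (identifier : String) (new_code : String) (out : String) : Prop := out = insert_code_before_py_alt content identifier new_code
instance (content : String) (identifier : String) (new_code : String) (out : String) : Decidable (Spec_insert_code_before_py content identifier new_code out) := by unfold Spec_insert_code_before_py; infer_instance

-- ===== CLAIM (what is proved, stated in full; the proofs are below) =====
def Claim_equal_insert_code_before_py : Prop := ∀ (content : String) (identifier : String) (new_code : String), Dom_insert_code_before_py content identifier new_code → Pre_insert_code_before_py content identifier new_code → Spec_insert_code_before_py content identifier new_code (insert_code_before_py content identifier new_code)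

-- ===== LEMMAS AND PROOFS =====

-- structure of PySem.Chars.splitOn on '\n'
theorem pvGo_no_nl (l : List Char) (fuel : Nat) (cur : List Char) (acc : List (List Char)) (h : '\n' ∉ l) :
    PySem.Chars.splitOn.go ['\n'] fuel l cur acc = ((cur.reverse ++ l) :: acc).reverse := by
  induction l generalizing fuel cur with
  | nil => cases fuel <;> simp [PySem.Chars.splitOn.go]
  | cons c cs ih =>
    cases fuel with
    | zero => simp [PySem.Chars.splitOn.go]
    | succ f =>
      have hc : c ≠ '\n' := fun hh => h (hh ▸ List.mem_cons_self ..)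
      rw [PySem.Chars.splitOn.go]
      simp [List.isPrefixOf, Ne.symm hc]
      rw [ih f (c :: cur) (fun hm => h (List.mem_cons_of_mem _ hm))]
      simp

theorem pvGo_acc (fuel : Nat) (s : List Char) (cur : List Char) (acc : List (List Char)) :
    PySem.Chars.splitOn.go ['\n'] fuel s cur acc = acc.reverse ++ PySem.Chars.splitOn.go ['\n'] fuel s cur [] := by
  induction fuel generalizing s cur acc with
  | zero => simp [PySem.Chars.splitOn.go]
  | succ f ih =>
    cases s with
    | nil => simp [PySem.Chars.splitOn.go]
    | cons c cs =>
      rw [PySem.Chars.splitOn.go]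
      conv_rhs => rw [PySem.Chars.splitOn.go]
      by_cases hc : List.isPrefixOf ['\n'] (c :: cs) = true
      · simp only [hc, if_pos]
        rw [ih _ [] (cur.reverse :: acc), ih _ [] [cur.reverse]]
        simp
      · simp only [hc, Bool.false_eq_true, if_neg, not_false_iff]
        exact ih cs (c :: cur) acc

theorem pvGo_cons_nl (l : List Char) (fuel : Nat) (rest : List Char) (cur : List Char)
    (acc : List (List Char)) (h : '\n' ∉ l) :
    PySem.Chars.splitOn.go ['\n'] (fuel + (l.length + 1)) (l ++ '\n' :: rest) cur acc
      = PySem.Chars.splitOn.go ['\n'] fuel rest [] ((cur.reverse ++ l) :: acc) := by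
  induction l generalizing cur with
  | nil =>
    simp only [List.nil_append, List.length_nil, Nat.zero_add]
    rw [PySem.Chars.splitOn.go]
    simp [List.isPrefixOf]
  | cons c cs ih =>
    have hc : c ≠ '\n' := fun hh => h (hh ▸ List.mem_cons_self ..)
    simp only [List.cons_append, List.length_cons]
    rw [show fuel + (cs.length + 1 + 1) = (fuel + (cs.length + 1)) + 1 by omega]
    rw [PySem.Chars.splitOn.go]
    simp only [List.isPrefixOf, Bool.and_eq_true, beq_iff_eq]
    rw [if_neg (by simp [Ne.symm hc])]
    rw [ih (c :: cur) (fun hm => h (List.mem_cons_of_mem _ hm))]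
    simp

theorem pvSplitOn_no_nl (cs : List Char) (h : '\n' ∉ cs) :
    PySem.Chars.splitOn cs ['\n'] = [cs] := by
  rw [PySem.Chars.splitOn, pvGo_no_nl _ _ _ _ h]; simp

theorem pvSplitOn_cons (l rest : List Char) (h : '\n' ∉ l) :
    PySem.Chars.splitOn (l ++ '\n' :: rest) ['\n'] = l :: PySem.Chars.splitOn rest ['\n'] := by
  rw [PySem.Chars.splitOn, PySem.Chars.splitOn]
  rw [show (l ++ '\n' :: rest).length + 1 = (rest.length + 1) + (l.length + 1) by simp; omega]
  rw [pvGo_cons_nl _ _ _ _ _ h, pvGo_acc]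
  simp

theorem pvGo_ne_nil (fuel : Nat) (s : List Char) (cur : List Char) (acc : List (List Char)) :
    PySem.Chars.splitOn.go ['\n'] fuel s cur acc ≠ [] := by
  induction fuel generalizing s cur acc with
  | zero => simp [PySem.Chars.splitOn.go]
  | succ f ih =>
    cases s with
    | nil => simp [PySem.Chars.splitOn.go]
    | cons c cs =>
      rw [PySem.Chars.splitOn.go]
      by_cases hc : List.isPrefixOf ['\n'] (c :: cs) = true
      · simp only [hc, if_pos]; exact ih _ _ _
      · simp only [hc, Bool.false_eq_true, if_neg, not_false_iff]; exact ih _ _ _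

theorem pvSplitOn_ne_nil (cs : List Char) : PySem.Chars.splitOn cs ['\n'] ≠ [] :=
  pvGo_ne_nil _ _ _ _

theorem pvExists_first_nl {cs : List Char} (h : '\n' ∈ cs) :
    ∃ l rest, '\n' ∉ l ∧ cs = l ++ '\n' :: rest := by
  induction cs with
  | nil => simp at h
  | cons c cs ih =>
    by_cases hc : c = '\n'
    · exact ⟨[], cs, by simp, by simp [hc]⟩
    · obtain ⟨l, rest, hl, hr⟩ := ih (by rcases List.mem_cons.1 h with h1 | h1; exact absurd h1.symm hc; exact h1)
      exact ⟨c :: l, rest, by simp [hl, Ne.symm hc], by simp [hr]⟩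

theorem pvJoin_splitOn (cs : List Char) :
    PySem.Chars.join ['\n'] (PySem.Chars.splitOn cs ['\n']) = cs := by
  by_cases h : '\n' ∈ cs
  · obtain ⟨l, rest, hl, hr⟩ := pvExists_first_nl h
    rw [hr, pvSplitOn_cons _ _ hl]
    obtain ⟨r, R, hR⟩ : ∃ r R, PySem.Chars.splitOn rest ['\n'] = r :: R := by
      cases hsp : PySem.Chars.splitOn rest ['\n'] with
      | nil => exact absurd hsp (pvSplitOn_ne_nil rest)
      | cons r R => exact ⟨r, R, rfl⟩
    rw [hR, PySem.Chars.join_cons_cons, ← hR, pvJoin_splitOn rest]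
    simp
  · rw [pvSplitOn_no_nl _ h, PySem.Chars.join_singleton]
termination_by cs.length
decreasing_by subst hr; simp; omega

-- pvFindLine index shift
theorem pvFindLine_shift (ls : List (List Char)) (identifier : List Char) (n : Nat) :
    pvFindLine ls identifier n = (pvFindLine ls identifier 0).map (· + n) := by
  induction ls generalizing n with
  | nil => rfl
  | cons l ls ih =>
    rw [pvFindLine, pvFindLine]
    by_cases hc : PySem.Chars.isIn identifier l = true
    · simp [hc]
    · simp only [hc, Bool.false_eq_true, if_neg, not_false_iff]
      rw [ih (n + 1), ih 1]
      cases pvFindLine ls identifier 0 <;> simp <;> omega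

-- pvRPartNl structure
theorem pvRPartNl_no_nl (s : List Char) (h : '\n' ∉ s) : pvRPartNl s = none := by
  induction s with
  | nil => rfl
  | cons c cs ih =>
    rw [pvRPartNl, ih (fun hm => h (List.mem_cons_of_mem _ hm))]
    simp [show c ≠ '\n' from fun hh => h (hh ▸ List.mem_cons_self ..)]

theorem pvRPartNl_append (l ys : List Char) (h : '\n' ∉ l) :
    pvRPartNl (l ++ '\n' :: ys)
      = some (match pvRPartNl ys with
              | some (h', t) => (l ++ '\n' :: h', t)
              | none => (l, ys)) := by
  induction l with
  | nil =>
    rw [List.nil_append, pvRPartNl]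
    cases hys : pvRPartNl ys with
    | none => simp [hys]
    | some p => cases p; simp
  | cons c cs ih =>
    rw [List.cons_append, pvRPartNl, ih (fun hm => h (List.mem_cons_of_mem _ hm))]
    cases hys : pvRPartNl ys with
    | none => simp
    | some p => cases p; simp

-- find facts
theorem pvPrefix_of_prefix_append (a b id : List Char)
    (h : id <+: a ++ b) (hlen : id.length ≤ a.length) : id <+: a := by
  obtain ⟨t, ht⟩ := h
  have h1 : id = (a ++ b).take id.length := by rw [← ht]; simp
  rw [List.take_append_of_le_length hlen] at h1
  exact h1 ▸ List.take_prefix _ a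

theorem pvFind_le_of_occ (cs id : List Char) (q : Nat) (h : id <+: cs.drop q) :
    0 ≤ PySem.Chars.find cs id ∧ PySem.Chars.find cs id ≤ q := by
  have hocc : id <:+: cs := h.isInfix.trans (List.drop_suffix q cs).isInfix
  have h0 : 0 ≤ PySem.Chars.find cs id := (PySem.Chars.find_nonneg_iff cs id).2 hocc
  refine ⟨h0, ?_⟩
  by_contra hlt
  push_neg at hlt
  exact (PySem.Chars.find_spec h0).2 q (by omega) h

theorem pvOcc_low (id l rest : List Char) (hid : '\n' ∉ id) (i : Nat)
    (hle : i ≤ l.length) (h : id <+: (l ++ '\n' :: rest).drop i) : id <:+: l := by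
  rw [List.drop_append_of_le_length hle] at h
  by_cases hlen : id.length ≤ (l.drop i).length
  · exact (pvPrefix_of_prefix_append _ _ _ h hlen).isInfix.trans (List.drop_suffix i l).isInfix
  · exfalso
    push_neg at hlen
    obtain ⟨t, ht⟩ := h
    refine hid ?_
    have hg : (id ++ t)[(l.drop i).length]? = some '\n' := by
      rw [ht, List.getElem?_append_right (le_refl _)]
      simp
    rw [List.getElem?_append_left hlen] at hg
    exact List.mem_of_getElem? hg

theorem pvInfix_exists_bounded_drop (id l : List Char) (h : id <:+: l) :
    ∃ q, q ≤ l.length ∧ id <+: l.drop q := by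
  obtain ⟨s, t, ht⟩ := h
  refine ⟨s.length, ?_, ?_⟩
  · rw [← ht]; simp
  · rw [← ht, List.append_assoc, List.drop_left]
    exact List.prefix_append id t

theorem pvOcc_rest (id l rest : List Char) (hid : '\n' ∉ id) (hnot : ¬ id <:+: l)
    (hocc : id <:+: (l ++ '\n' :: rest)) : id <:+: rest := by
  obtain ⟨q, hq, hpre⟩ := pvInfix_exists_bounded_drop id _ hocc
  by_cases hlow : q ≤ l.length
  · exact absurd (pvOcc_low id l rest hid q hlow hpre) hnot
  · push_neg at hlow
    have hdrop : (l ++ '\n' :: rest).drop q = rest.drop (q - (l.length + 1)) := by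
      rw [show l ++ '\n' :: rest = (l ++ ['\n']) ++ rest by simp, List.drop_append]
      have h2 : (l ++ ['\n']).drop q = [] := List.drop_eq_nil_of_le (by simp; omega)
      simp [h2]
    rw [hdrop] at hpre
    exact hpre.isInfix.trans (List.drop_suffix _ rest).isInfix

theorem pvFind_append (id l rest : List Char) (hid : '\n' ∉ id)
    (hnot : ¬ id <:+: l) (hocc : id <:+: rest) :
    PySem.Chars.find (l ++ '\n' :: rest) id = l.length + 1 + PySem.Chars.find rest id := by
  have hr0 : 0 ≤ PySem.Chars.find rest id := (PySem.Chars.find_nonneg_iff rest id).2 hocc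
  set p := (PySem.Chars.find rest id).toNat with hp
  have hrspec := PySem.Chars.find_spec hr0
  have hbig : id <+: (l ++ '\n' :: rest).drop (l.length + 1 + p) := by
    have heq : (l ++ '\n' :: rest).drop (l.length + 1 + p) = rest.drop p := by
      rw [show l ++ '\n' :: rest = (l ++ ['\n']) ++ rest by simp, List.drop_append]
      simp
    rw [heq]; exact hrspec.1
  obtain ⟨h0, hle⟩ := pvFind_le_of_occ _ _ _ hbig
  have hmin := (PySem.Chars.find_spec h0).1
  set f := (PySem.Chars.find (l ++ '\n' :: rest) id).toNat with hf
  have hflow : ¬ f ≤ l.length := by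
    intro hlow
    exact hnot (pvOcc_low id l rest hid f hlow hmin)
  have hfhigh : l.length + 1 + p ≤ f := by
    by_contra hc
    push_neg at hc
    have hk : f - (l.length + 1) < p := by omega
    have hocc2 : id <+: rest.drop (f - (l.length + 1)) := by
      have hdrop : (l ++ '\n' :: rest).drop f = rest.drop (f - (l.length + 1)) := by
        rw [show l ++ '\n' :: rest = (l ++ ['\n']) ++ rest by simp, List.drop_append]
        have h2 : (l ++ ['\n']).drop f = [] := List.drop_eq_nil_of_le (by simp; omega)
        simp [h2]
      rw [← hdrop]; exact hmin
    exact hrspec.2 _ hk hocc2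
  omega

-- the main list-level equivalence
-- join of a cons with nonempty tail
theorem pvJoin_cons (x : List Char) (ys : List (List Char)) (h : ys ≠ []) :
    PySem.Chars.join ['\n'] (x :: ys) = x ++ '\n' :: PySem.Chars.join ['\n'] ys := by
  cases ys with
  | nil => exact absurd rfl h
  | cons y ys => rw [PySem.Chars.join_cons_cons]; simp

theorem pvBCore_else (cs id nc : List Char) (h0 : 0 ≤ PySem.Chars.find cs id)
    (hnlid : PySem.Chars.isIn ['\n'] id = false) :
    pvBCore cs id nc =
      (match pvRPartNl (cs.take (PySem.Chars.find cs id).toNat) with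
        | none => nc ++ '\n' :: cs
        | some (h, _) => cs.take (h.length + 1) ++ nc ++ '\n' :: cs.drop (h.length + 1)) := by
  unfold pvBCore
  rw [if_neg (by rw [hnlid]; simp; omega)]
  rw [PySem.List.slice_to cs h0]
  cases hrp : pvRPartNl (cs.take (PySem.Chars.find cs id).toNat) with
  | none =>
    simp only
    rw [PySem.List.slice_to cs (by norm_num : (0:Int) ≤ 0), PySem.List.slice_from cs (by norm_num : (0:Int) ≤ 0)]
    simp
  | some p =>
    obtain ⟨h, t⟩ := p
    simp only
    rw [PySem.List.slice_to cs (by positivity), PySem.List.slice_from cs (by positivity)]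
    norm_num


theorem pvTakeHigh (l rest : List Char) (k : Nat) :
    (l ++ '\n' :: rest).take (l.length + 1 + k) = l ++ '\n' :: rest.take k := by
  rw [show l ++ '\n' :: rest = (l ++ ['\n']) ++ rest by simp,
    show l.length + 1 + k = (l ++ ['\n']).length + k by simp,
    List.take_length_add_append]
  simp

theorem pvDropHigh (l rest : List Char) (k : Nat) :
    (l ++ '\n' :: rest).drop (l.length + 1 + k) = rest.drop k := by
  rw [show l ++ '\n' :: rest = (l ++ ['\n']) ++ rest by simp, List.drop_append]
  simp

theorem pvFindLine_some (cs id : List Char) (hid : '\n' ∉ id) (hocc : id <:+: cs) :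
    ∃ i, pvFindLine (PySem.Chars.splitOn cs ['\n']) id 0 = some i := by
  by_cases hnl : '\n' ∈ cs
  · obtain ⟨l, rest, hl, hr⟩ := pvExists_first_nl hnl
    subst hr
    rw [pvSplitOn_cons _ _ hl]
    by_cases hin : PySem.Chars.isIn id l = true
    · exact ⟨0, by simp only [pvFindLine]; rw [if_pos hin]⟩
    · have hnotl : ¬ id <:+: l := fun hinf => hin ((PySem.Chars.isIn_iff_infix _ _).2 hinf)
      obtain ⟨i, hi⟩ := pvFindLine_some rest id hid (pvOcc_rest id l rest hid hnotl hocc)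
      exact ⟨i + 1, by
        simp only [pvFindLine]
        rw [if_neg (by simp [hin]), pvFindLine_shift, hi]
        rfl⟩
  · rw [pvSplitOn_no_nl _ hnl]
    exact ⟨0, by simp only [pvFindLine]; rw [if_pos ((PySem.Chars.isIn_iff_infix _ _).2 hocc)]⟩
termination_by cs.length
decreasing_by subst hr; simp; omega

theorem pvMain (cs identifier nc : List Char) (hid : '\n' ∉ identifier) (hocc : identifier <:+: cs) :
    pvACore cs identifier nc = pvBCore cs identifier nc := by
  have hnlid : PySem.Chars.isIn ['\n'] identifier = false := by
    rw [PySem.Chars.isIn_eq_false_iff]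
    exact fun hinf => hid ((List.singleton_infix_iff _ _).1 hinf)
  have h0 : 0 ≤ PySem.Chars.find cs identifier := (PySem.Chars.find_nonneg_iff _ _).2 hocc
  by_cases hnl : '\n' ∈ cs
  · obtain ⟨l, rest, hl, hr⟩ := pvExists_first_nl hnl
    subst hr
    by_cases hin : PySem.Chars.isIn identifier l = true
    · -- identifier occurs in the first line: both sides insert at the very front
      have hfle : PySem.Chars.find (l ++ '\n' :: rest) identifier ≤ l.length := by
        obtain ⟨q, hq, hpre⟩ := pvInfix_exists_bounded_drop identifier l
          ((PySem.Chars.isIn_iff_infix _ _).1 hin)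
        have hocc2 : identifier <+: (l ++ '\n' :: rest).drop q := by
          rw [List.drop_append_of_le_length hq]
          exact hpre.trans (List.prefix_append _ _)
        have := (pvFind_le_of_occ _ identifier q hocc2).2
        omega
      have hrp : pvRPartNl ((l ++ '\n' :: rest).take
          (PySem.Chars.find (l ++ '\n' :: rest) identifier).toNat) = none := by
        apply pvRPartNl_no_nl
        rw [List.take_append_of_le_length (by omega)]
        exact fun hm => hl ((List.take_sublist _ _).subset hm)
      have hfl : pvFindLine (PySem.Chars.splitOn (l ++ '\n' :: rest) ['\n']) identifier 0 = some 0 := by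
        rw [pvSplitOn_cons _ _ hl]
        simp only [pvFindLine]
        rw [if_pos hin]
      rw [pvBCore_else _ identifier nc h0 hnlid, hrp]
      simp only [pvACore, hfl]
      rw [PySem.List.slice_to _ (by norm_num : (0:Int) ≤ (0:Nat)),
        PySem.List.slice_from _ (by norm_num : (0:Int) ≤ (0:Nat))]
      simp only [Nat.cast_zero, Int.toNat_zero, List.take_zero, List.drop_zero,
        List.nil_append, List.singleton_append]
      rw [pvJoin_cons nc _ (pvSplitOn_ne_nil _), pvJoin_splitOn]
    · -- identifier first occurs after the first line: recurse on rest
      have hnotl : ¬ identifier <:+: l := fun hinf => hin ((PySem.Chars.isIn_iff_infix _ _).2 hinf)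
      have hoccr : identifier <:+: rest := pvOcc_rest identifier l rest hid hnotl hocc
      have ih := pvMain rest identifier nc hid hoccr
      have hr0 : 0 ≤ PySem.Chars.find rest identifier := (PySem.Chars.find_nonneg_iff _ _).2 hoccr
      obtain ⟨i, hi⟩ := pvFindLine_some rest identifier hid hoccr
      have hfl : pvFindLine (PySem.Chars.splitOn (l ++ '\n' :: rest) ['\n']) identifier 0
          = some (i + 1) := by
        rw [pvSplitOn_cons _ _ hl]
        simp only [pvFindLine]
        rw [if_neg (by simp [hin]), pvFindLine_shift, hi]
        rfl
      have hA : pvACore (l ++ '\n' :: rest) identifier nc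
          = l ++ '\n' :: pvACore rest identifier nc := by
        simp only [pvACore, hfl, hi]
        rw [pvSplitOn_cons _ _ hl]
        rw [PySem.List.slice_to _ (by positivity), PySem.List.slice_from _ (by positivity),
          PySem.List.slice_to _ (by positivity), PySem.List.slice_from _ (by positivity)]
        simp only [Int.toNat_natCast, List.take_succ_cons, List.drop_succ_cons]
        rw [List.cons_append, List.cons_append, pvJoin_cons _ _ (by simp)]
      have hfcs : PySem.Chars.find (l ++ '\n' :: rest) identifier
          = l.length + 1 + PySem.Chars.find rest identifier :=
        pvFind_append identifier l rest hid hnotl hoccr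
      have htake : (l ++ '\n' :: rest).take (PySem.Chars.find (l ++ '\n' :: rest) identifier).toNat
          = l ++ '\n' :: rest.take (PySem.Chars.find rest identifier).toNat := by
        rw [hfcs, show ((l.length : Int) + 1 + PySem.Chars.find rest identifier).toNat
            = l.length + 1 + (PySem.Chars.find rest identifier).toNat by omega]
        exact pvTakeHigh _ _ _
      have hB : pvBCore (l ++ '\n' :: rest) identifier nc
          = l ++ '\n' :: pvBCore rest identifier nc := by
        rw [pvBCore_else _ identifier nc h0 hnlid, pvBCore_else rest identifier nc hr0 hnlid,
          htake, pvRPartNl_append _ _ hl]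
        cases hrp : pvRPartNl (rest.take (PySem.Chars.find rest identifier).toNat) with
        | none =>
          simp only []
          rw [show (l:List Char).length + 1 = l.length + 1 + 0 by omega, pvTakeHigh, pvDropHigh]
          simp
        | some p =>
          obtain ⟨h2, t⟩ := p
          simp only []
          rw [show (l ++ '\n' :: h2).length + 1 = l.length + 1 + (h2.length + 1) by simp; omega,
            pvTakeHigh, pvDropHigh]
          simp
      rw [hA, hB, ih]
  · -- single-line content: insert at the very front on both sides
    have hpreNoNl : '\n' ∉ cs.take (PySem.Chars.find cs identifier).toNat :=
      fun hm => hnl ((List.take_sublist _ _).subset hm)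
    have hfl : pvFindLine (PySem.Chars.splitOn cs ['\n']) identifier 0 = some 0 := by
      rw [pvSplitOn_no_nl _ hnl]
      simp only [pvFindLine]
      rw [if_pos ((PySem.Chars.isIn_iff_infix _ _).2 hocc)]
    rw [pvBCore_else _ identifier nc h0 hnlid, pvRPartNl_no_nl _ hpreNoNl]
    simp only [pvACore, hfl]
    rw [PySem.List.slice_to _ (by norm_num : (0:Int) ≤ (0:Nat)),
      PySem.List.slice_from _ (by norm_num : (0:Int) ≤ (0:Nat))]
    simp only [Nat.cast_zero, Int.toNat_zero, List.take_zero, List.drop_zero,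
      List.nil_append, List.singleton_append]
    rw [pvJoin_cons nc _ (pvSplitOn_ne_nil _), pvJoin_splitOn]
termination_by cs.length
decreasing_by subst hr; simp; omega

-- ===== VERDICT (by name: the statement is the Claim_ definition above) =====
theorem insert_code_before_py_spec : Claim_equal_insert_code_before_py := by
  intro content identifier new_code _hdom hpre
  obtain ⟨h1, h2⟩ := hpre
  unfold Spec_insert_code_before_py insert_code_before_py insert_code_before_py_alt
  have hocc : identifier.toList <:+: content.toList := (PySem.Str.isIn_iff_infix _ _).1 h1
  have hid : '\n' ∉ identifier.toList := by
    intro hmem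
    have hh : PySem.Str.isIn "\n" identifier = true := by
      rw [PySem.Str.isIn_iff_infix]
      exact (List.singleton_infix_iff '\n' identifier.toList).2 hmem
    rw [hh] at h2
    exact absurd h2 (by simp)
  rw [pvMain _ _ _ hid hocc]
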